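-- pv_equiv track=rewrite | github.com/YOONseunghyeon/Kobart_application | home/pdf.py | istitle
-- ===== SOURCE A (Python) =====
-- def istitle(text) :
--     if text.count('.') != 1 :
--         return False
--     numbers = ['I', 'V', 'X', '0', '1', '2', '3', '4', '5', '6', '7', '8', '9']
--
--     for num in text.split('.')[0] :
--         if num not in numbers :
--             return False
--     return True
-- ===== SOURCE B (Python) =====
-- def istitle(text):
--     seen_dot = False
--     for c in text:
--         if c == '.':
--             if seen_dot:
--                 return False
--             seen_dot = True
--         elif not seen_dot and c not in 'IVX0123456789':
--             return False
--     return seen_dot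
-- ===== Notes on version B (the rewrite author's own statement) =====
-- stated objective: alternative
-- what changed: Replaced the three traversals (dot count, split, membership loop over the prefix) by a single left-to-right pass with a seen-dot state flag that rejects a second dot or a bad prefix character on sight.
import Mathlib
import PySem

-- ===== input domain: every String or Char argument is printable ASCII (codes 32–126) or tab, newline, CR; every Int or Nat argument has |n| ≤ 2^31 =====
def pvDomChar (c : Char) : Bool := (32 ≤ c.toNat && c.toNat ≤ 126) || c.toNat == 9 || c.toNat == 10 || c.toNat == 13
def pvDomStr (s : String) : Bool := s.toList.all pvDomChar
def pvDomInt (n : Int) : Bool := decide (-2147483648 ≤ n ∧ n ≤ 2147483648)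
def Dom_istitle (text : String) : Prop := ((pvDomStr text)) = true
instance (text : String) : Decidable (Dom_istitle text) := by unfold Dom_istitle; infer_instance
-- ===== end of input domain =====

-- B replaces A's three traversals (count, split, membership loop) by one pass with a seen-dot flag; same return value on every string.

-- ===== PORT A =====
def istitleNumbers : List Char := ['I', 'V', 'X', '0', '1', '2', '3', '4', '5', '6', '7', '8', '9']

-- the 'for num in text.split('.')[0]' membership loop
def istitleLoopA : List Char → Bool
  | [] => true
  | c :: rest => if c ∉ istitleNumbers then false else istitleLoopA rest

def istitle (text : String) : Bool :=
  if PySem.Str.count text "." ≠ 1 then false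
  else
    match PySem.Str.split? text "." with
    | none => false            -- unreachable: the separator "." is nonempty
    | some parts =>
      match PySem.List.pyGet? parts 0 with
      | none => false          -- unreachable: split always yields a nonempty list
      | some head => istitleLoopA head.toList

-- ===== PORT B =====
-- the single 'for c in text' loop carrying the seen_dot flag
def istitleLoopB : List Char → Bool → Bool
  | [], seen => seen
  | c :: rest, seen =>
    if c = '.' then
      if seen then false else istitleLoopB rest true
    else if !seen && c ∉ "IVX0123456789".toList then false
    else istitleLoopB rest seen

def istitle_alt (text : String) : Bool := istitleLoopB text.toList false

-- ===== PRECONDITION & SPEC =====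
def Spec_istitle (text : String) (out : Bool) : Prop := out = istitle_alt text
instance (text : String) (out : Bool) : Decidable (Spec_istitle text out) := by unfold Spec_istitle; infer_instance

-- ===== CLAIM (what is proved, stated in full; the proofs are below) =====
def Claim_equal_istitle : Prop := ∀ (text : String), Dom_istitle text → Spec_istitle text (istitle text)

-- ===== LEMMAS AND PROOFS =====

-- counting the single character '.' with Chars.count.go is List.count
lemma countgo_dot (l : List Char) (fuel acc : Nat) (h : l.length ≤ fuel) :
    PySem.Chars.count.go ['.'] fuel l acc = acc + l.count '.' := by
  induction l generalizing fuel acc with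
  | nil => cases fuel <;> simp [PySem.Chars.count.go]
  | cons c t ih =>
    cases fuel with
    | zero => simp at h
    | succ f =>
      simp only [PySem.Chars.count.go, List.isPrefixOf, List.count_cons]
      by_cases hc : c = '.'
      · subst hc
        simp only [beq_self_eq_true, Bool.true_and, if_pos, List.length_cons,
          List.length_nil, List.drop_succ_cons, List.drop_zero] at h ⊢
        rw [ih _ _ (by omega)]
        omega
      · rw [if_neg (by simp [Ne.symm hc])]
        rw [ih _ _ (by simpa using Nat.le_of_succ_le_succ h)]
        simp [hc]

-- the first piece of splitOn.go on separator '.' is cur.reverse ++ takeWhile (· ≠ '.')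
lemma splitgo_head (l : List Char) (fuel : Nat) (cur : List Char) (acc : List (List Char))
    (h : l.length ≤ fuel) :
    ∃ rest, PySem.Chars.splitOn.go ['.'] fuel l cur acc
      = acc.reverse ++ (cur.reverse ++ l.takeWhile (· ≠ '.')) :: rest := by
  induction l generalizing fuel cur acc with
  | nil =>
    refine ⟨[], ?_⟩
    cases fuel <;> simp [PySem.Chars.splitOn.go]
  | cons c t ih =>
    cases fuel with
    | zero => simp at h
    | succ f =>
      simp only [PySem.Chars.splitOn.go, List.isPrefixOf]
      by_cases hc : c = '.'
      · subst hc
        rw [if_pos (by decide : (('.' == '.' && true) = true))]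
        simp only [List.length_cons, List.drop_succ_cons]
        obtain ⟨rest, hr⟩ := ih f [] (List.reverse cur :: acc) (by simpa using Nat.le_of_succ_le_succ h)
        refine ⟨t.takeWhile (· ≠ '.') :: rest, ?_⟩
        simp [hr]
      · rw [if_neg (by simp [Ne.symm hc])]
        obtain ⟨rest, hr⟩ := ih f (c :: cur) acc (by simpa using Nat.le_of_succ_le_succ h)
        refine ⟨rest, ?_⟩
        simp [hr, hc]

-- A, rewritten over the character list
lemma istitle_eq (text : String) :
    istitle text =
      (if text.toList.count '.' ≠ 1 then false
       else istitleLoopA (text.toList.takeWhile (· ≠ '.'))) := by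
  unfold istitle
  have hc : PySem.Str.count text "." = text.toList.count '.' := by
    show PySem.Chars.count text.toList ['.'] = _
    unfold PySem.Chars.count
    simpa using countgo_dot text.toList text.toList.length 0 le_rfl
  rw [hc]
  by_cases h1 : text.toList.count '.' ≠ 1
  · simp [h1]
  · rw [if_neg h1, if_neg h1]
    show (match PySem.Str.split? text "." with
      | none => false
      | some parts => match PySem.List.pyGet? parts 0 with
        | none => false
        | some head => istitleLoopA head.toList) = _
    have : PySem.Str.split? text "." =
        some ((PySem.Chars.splitOn text.toList ['.']).map String.ofList) := rfl
    rw [this]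
    obtain ⟨rest, hr⟩ := splitgo_head text.toList (text.toList.length + 1) [] [] (by omega)
    show (match PySem.List.pyGet? ((PySem.Chars.splitOn text.toList ['.']).map String.ofList) 0 with
      | none => false
      | some head => istitleLoopA head.toList) = _
    unfold PySem.Chars.splitOn
    rw [hr]
    simp [PySem.List.pyGet?, PySem.List.pyIdx?]

-- once the dot has been seen, B accepts iff no further dot occurs
lemma loopB_true (cs : List Char) : istitleLoopB cs true = decide (cs.count '.' = 0) := by
  induction cs with
  | nil => rfl
  | cons c t ih =>
    by_cases hc : c = '.'
    · subst hc; simp [istitleLoopB]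
    · simp [istitleLoopB, hc, ih]

-- the two programs agree on every character list
lemma main (cs : List Char) :
    (if cs.count '.' ≠ 1 then false else istitleLoopA (cs.takeWhile (· ≠ '.')))
      = istitleLoopB cs false := by
  induction cs with
  | nil => simp [istitleLoopB]
  | cons c t ih =>
    by_cases hc : c = '.'
    · subst hc
      simp only [istitleLoopB, if_neg (Bool.false_ne_true), loopB_true,
        List.count_cons_self, List.takeWhile_cons]
      by_cases h0 : t.count '.' = 0 <;> simp [h0, istitleLoopA]
    · have hlist : "IVX0123456789".toList = istitleNumbers := by decide
      by_cases hn : c ∈ istitleNumbers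
      · have hB : istitleLoopB (c :: t) false = istitleLoopB t false := by
          simp [istitleLoopB, hc, hlist, hn]
        have hcount : List.count '.' (c :: t) = List.count '.' t := by
          simp [hc, Ne.symm hc]
        have htake : List.takeWhile (fun x => decide (x ≠ '.')) (c :: t)
            = c :: List.takeWhile (fun x => decide (x ≠ '.')) t := by
          simp [hc]
        rw [hB, ← ih, hcount, htake]
        by_cases h1 : t.count '.' ≠ 1 <;> simp [h1, istitleLoopA, hn]
      · simp [istitleLoopB, hc, hlist, hn, istitleLoopA]

-- ===== VERDICT (by name: the statement is the Claim_ definition above) =====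
theorem istitle_spec : Claim_equal_istitle := by
  intro text _
  show istitle text = istitle_alt text
  rw [istitle_eq, istitle_alt, main]
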